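-- pv_equiv track=rewrite | github.com/RAIK283H/pathfinding-code-DanielKasparek | permutation.py | steinhaus_johnson_trotter
-- ===== SOURCE A (Python) =====
-- def steinhaus_johnson_trotter(n):
--     """
--     Generate all permutations of integers 1 to n using the Steinhaus-Johnson-Trotter algorithm.
--
--     Parameters:
--     n (int): The number of elements to permute.
--
--     Returns:
--     list: A list of all permutations.
--     """
--     # Start with integers from 1 to n (for nodes 1 to n-1)
--     sequence = [(i + 1, -1) for i in range(n)]
--
--     def get_mobile_integer(seq):
--         mobile_integer = None
--         mobile_index = None
--         for i, (value, direction) in enumerate(seq):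
--             neighbor_index = i + direction
--             if 0 <= neighbor_index < len(seq) and value > seq[neighbor_index][0]:
--                 if mobile_integer is None or value > mobile_integer:
--                     mobile_integer, mobile_index = value, i
--         return mobile_integer, mobile_index
--
--     def swap_and_update_directions(seq, mobile_index):
--         value, direction = seq[mobile_index]
--         neighbor_index = mobile_index + direction
--         seq[mobile_index], seq[neighbor_index] = seq[neighbor_index], seq[mobile_index]
--
--         for i, (val, dir) in enumerate(seq):
--             if val > value:
--                 seq[i] = (val, -dir)
--
--     permutations = []
--     while True:
--         permutations.append([value for value, _ in sequence])
--         mobile_integer, mobile_index = get_mobile_integer(sequence)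
--         if mobile_integer is None:
--             break
--         swap_and_update_directions(sequence, mobile_index)
--
--     return permutations
-- ===== SOURCE B (Python) =====
-- def steinhaus_johnson_trotter(n):
--     """
--     Generate all permutations of integers 1 to n in Steinhaus-Johnson-Trotter
--     (plain changes) order, by recursive insertion: permutations of 1..k are
--     obtained by sliding k through each permutation of 1..k-1, alternating the
--     sweep direction (right-to-left first).
--     """
--     def perms(k):
--         if k <= 0:
--             return [[]]
--         out = []
--         right_to_left = True
--         for p in perms(k - 1):
--             if right_to_left:
--                 positions = range(len(p), -1, -1)
--             else:
--                 positions = range(0, len(p) + 1)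
--             for i in positions:
--                 out.append(p[:i] + [k] + p[i:])
--             right_to_left = not right_to_left
--         return out
--     return perms(n)
-- ===== Notes on version B (the rewrite author's own statement) =====
-- stated objective: alternative
-- what changed: Replaces the directed-integer SJT state machine (repeatedly scan for the largest mobile integer, swap it, flip directions) by recursive plain-changes insertion: permutations of 1..k are built by sliding k through each permutation of 1..k-1 with alternating sweep direction.
import Mathlib
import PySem

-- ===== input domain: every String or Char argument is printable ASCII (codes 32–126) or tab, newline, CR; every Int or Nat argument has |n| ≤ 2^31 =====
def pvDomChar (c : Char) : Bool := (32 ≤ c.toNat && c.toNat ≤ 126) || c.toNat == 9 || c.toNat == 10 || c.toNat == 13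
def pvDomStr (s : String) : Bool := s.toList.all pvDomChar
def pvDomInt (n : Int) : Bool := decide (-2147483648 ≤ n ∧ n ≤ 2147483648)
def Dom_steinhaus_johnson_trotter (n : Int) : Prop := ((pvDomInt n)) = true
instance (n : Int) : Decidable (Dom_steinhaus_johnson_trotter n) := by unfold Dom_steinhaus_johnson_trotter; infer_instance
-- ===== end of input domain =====

-- B replaces A's directed-integer state machine (scan for the largest mobile
-- integer, swap it, flip directions, repeat) by recursive "plain changes"
-- insertion: permutations of 1..k are obtained by sliding k through each
-- permutation of 1..k-1 with alternating sweep direction.  Objective: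
-- alternative algorithm of the same asymptotic cost.

-- ===== PORT A =====
-- state: a list of (value, direction) pairs, as in A's `sequence`

-- the `for i, (value, direction) in enumerate(seq)` loop of get_mobile_integer,
-- as structural recursion over the remaining elements with the index counter i;
-- acc is the (mobile_integer, mobile_index) pair (in A both are None or both
-- are set together, hence a single Option of a pair)
def sjtMobGo (seq : List (Int × Int)) : Nat → List (Int × Int) → Option (Int × Nat) → Option (Int × Nat)
  | _, [], acc => acc
  | i, (value, dir) :: rest, acc =>
      let nb : Int := (i : Int) + dir
      let acc' :=
        if 0 ≤ nb ∧ nb < (seq.length : Int) ∧ value > (seq.getD nb.toNat (0, 0)).1 then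
          match acc with
          | none => some (value, i)
          | some (mi, _) => if value > mi then some (value, i) else acc
        else acc
      sjtMobGo seq (i + 1) rest acc'

-- get_mobile_integer(seq)
def sjtMobile (seq : List (Int × Int)) : Option (Int × Nat) := sjtMobGo seq 0 seq none

-- swap_and_update_directions; the `seq[...]` accesses are exact via getD/set
-- because A only calls this with a mobile index (it has already checked
-- 0 <= neighbor_index < len(seq) for it)
def sjtSwapUpd (seq : List (Int × Int)) (mi : Nat) : List (Int × Int) :=
  let vd := seq.getD mi (0, 0)
  let nb : Nat := ((mi : Int) + vd.2).toNat
  let s1 := (seq.set mi (seq.getD nb (0, 0))).set nb vd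
  s1.map (fun p => if p.1 > vd.1 then (p.1, -p.2) else p)

-- the `while True` loop, with a fuel guard making it total; the loop emits
-- exactly n! permutations, so the factorial fuel passed below is proved
-- sufficient (lemmas perms_length / loop_exact)
def sjtLoop : Nat → List (Int × Int) → Option (List (List Int))
  | 0, _ => none
  | f + 1, seq =>
      let p := seq.map (·.1)
      match sjtMobile seq with
      | none => some [p]
      | some (_, i) => (sjtLoop f (sjtSwapUpd seq i)).map (p :: ·)

def steinhaus_johnson_trotter (n : Int) : List (List Int) :=
  let seq := (PySem.List.pyRange 0 n 1).map (fun i => (i + 1, (-1 : Int)))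
  (sjtLoop (Nat.factorial n.toNat) seq).getD []

-- ===== PORT B =====
-- p[:i] + [k] + p[i:], exact for the positions 0 ≤ i ≤ len p produced below
def pvIns (k : Int) (p : List Int) (i : Nat) : List Int := p.take i ++ k :: p.drop i

-- the `for p in perms(k-1)` loop with its alternating `right_to_left` flag;
-- range(len(p), -1, -1) is (List.range (len+1)).reverse, range(0, len(p)+1)
-- is List.range (len+1)
def sjtZig (k : Int) : Bool → List (List Int) → List (List Int)
  | _, [] => []
  | rtl, p :: rest =>
      ((if rtl then (List.range (p.length + 1)).reverse else List.range (p.length + 1)).map (pvIns k p))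
        ++ sjtZig k (!rtl) rest

-- perms(k); Source B's `k <= 0` base case is realized by the Nat recursion
-- together with `.toNat` at the call site
def sjtPerms : Nat → List (List Int)
  | 0 => [[]]
  | k + 1 => sjtZig ((k : Int) + 1) true (sjtPerms k)

def steinhaus_johnson_trotter_alt (n : Int) : List (List Int) := sjtPerms n.toNat

-- ===== PRECONDITION & SPEC =====
def Spec_steinhaus_johnson_trotter (n : Int) (out : List (List Int)) : Prop := out = steinhaus_johnson_trotter_alt n
instance (n : Int) (out : List (List Int)) : Decidable (Spec_steinhaus_johnson_trotter n out) := by unfold Spec_steinhaus_johnson_trotter; infer_instance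

-- ===== CLAIM (what is proved, stated in full; the proofs are below) =====
def Claim_equal_steinhaus_johnson_trotter : Prop := ∀ (n : Int), Dom_steinhaus_johnson_trotter n → Spec_steinhaus_johnson_trotter n (steinhaus_johnson_trotter n)

-- ===== LEMMAS AND PROOFS =====

def SmallOk (m : Int) (t : List (Int × Int)) : Prop :=
  ∀ p ∈ t, p.1 < m ∧ (p.2 = -1 ∨ p.2 = 1)

theorem mobGo_append (seq a : List (Int × Int)) : ∀ (b : List (Int × Int)) (i : Nat) (acc : Option (Int × Nat)),
    sjtMobGo seq i (a ++ b) acc = sjtMobGo seq (i + a.length) b (sjtMobGo seq i a acc) := by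
  induction a with
  | nil => intro b i acc; simp [sjtMobGo]
  | cons x rest ih =>
      intro b i acc
      obtain ⟨v, d⟩ := x
      simp only [List.cons_append, sjtMobGo, ih, List.length_cons]
      congr 1
      omega

-- accumulator values stay below m while scanning elements below m
theorem mobGo_lt (seq : List (Int × Int)) (m : Int) : ∀ (rest : List (Int × Int)) (i : Nat) (acc : Option (Int × Nat)),
    (∀ p ∈ rest, p.1 < m) → (∀ v j, acc = some (v, j) → v < m) →
    (∀ v j, sjtMobGo seq i rest acc = some (v, j) → v < m) := by
  intro rest
  induction rest with
  | nil => intro i acc _ hacc; simpa [sjtMobGo] using hacc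
  | cons x rest ih =>
      intro i acc hrest hacc
      obtain ⟨v, d⟩ := x
      have hv : v < m := hrest (v, d) List.mem_cons_self
      simp only [sjtMobGo]
      apply ih
      · intro p hp; exact hrest p (List.mem_cons_of_mem _ hp)
      · intro v' j' h
        split_ifs at h with hc
        · cases acc with
          | none => simp at h; omega
          | some a =>
              obtain ⟨mi, mj⟩ := a
              by_cases hgt : v > mi <;> simp [hgt] at h
              · omega
              · exact hacc v' j' (by simp [h])
        · exact hacc v' j' h

-- once the maximum m is recorded, smaller elements never displace it
theorem mobGo_absorb (seq : List (Int × Int)) (m : Int) : ∀ (rest : List (Int × Int)) (i k : Nat),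
    (∀ p ∈ rest, p.1 < m) → sjtMobGo seq i rest (some (m, k)) = some (m, k) := by
  intro rest
  induction rest with
  | nil => intro i k _; simp [sjtMobGo]
  | cons x rest ih =>
      intro i k hrest
      obtain ⟨v, d⟩ := x
      have hv : v < m := hrest (v, d) List.mem_cons_self
      simp only [sjtMobGo]
      have : ¬ v > m := by omega
      have hrest' : ∀ p ∈ rest, p.1 < m := fun p hp => hrest p (List.mem_cons_of_mem _ hp)
      split_ifs with hc <;> exact ih (i + 1) k hrest'

-- scanning the small elements behaves identically whether the big element m
-- sits (with any direction) in front of the list (indices shifted by one) ...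
theorem mobGo_consL (m dm : Int) (t : List (Int × Int)) :
    ∀ (rest : List (Int × Int)) (i : Nat) (acc : Option (Int × Nat)),
    (∀ p ∈ rest, p.1 < m ∧ (p.2 = -1 ∨ p.2 = 1)) →
    sjtMobGo ((m, dm) :: t) (i + 1) rest (acc.map (fun vi => (vi.1, vi.2 + 1)))
      = (sjtMobGo t i rest acc).map (fun vi => (vi.1, vi.2 + 1)) := by
  intro rest
  induction rest with
  | nil => intro i acc _; simp [sjtMobGo]
  | cons x rest ih =>
      intro i acc hrest
      obtain ⟨v, d⟩ := x
      obtain ⟨hv, hd⟩ := hrest (v, d) List.mem_cons_self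
      have hrest' : ∀ p ∈ rest, p.1 < m ∧ (p.2 = -1 ∨ p.2 = 1) :=
        fun p hp => hrest p (List.mem_cons_of_mem _ hp)
      simp only [sjtMobGo]
      have hcond : (0 ≤ (↑(i+1) : Int) + d ∧ (↑(i+1) : Int) + d < ↑(((m,dm) :: t).length) ∧ v > (((m,dm) :: t).getD ((↑(i+1) : Int) + d).toNat (0, 0)).1)
          ↔ (0 ≤ (↑i : Int) + d ∧ (↑i : Int) + d < ↑(t.length) ∧ v > (t.getD ((↑i : Int) + d).toNat (0, 0)).1) := by
        rcases hd with hd | hd <;> subst hd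
        · by_cases hi : i = 0
          · subst hi; simp; omega
          · have h1 : ((↑(i+1) : Int) + (-1)).toNat = ((↑i : Int) + (-1)).toNat + 1 := by omega
            rw [h1]
            simp only [List.getD, List.getElem?_cons_succ, List.length_cons]
            constructor <;> rintro ⟨a, b, c⟩ <;> exact ⟨by omega, by omega, c⟩
        · have h1 : ((↑(i+1) : Int) + 1).toNat = ((↑i : Int) + 1).toNat + 1 := by omega
          rw [h1]
          simp only [List.getD, List.getElem?_cons_succ, List.length_cons]
          constructor <;> rintro ⟨a, b, c⟩ <;> exact ⟨by omega, by omega, c⟩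
      simp only [hcond]
      split_ifs with hc
      · cases acc with
        | none => simpa using ih (i + 1) (some (v, i)) hrest'
        | some a =>
            obtain ⟨mi, mj⟩ := a
            by_cases hgt : v > mi
            · simpa [hgt] using ih (i + 1) (some (v, i)) hrest'
            · simpa [hgt] using ih (i + 1) (some (mi, mj)) hrest'
      · exact ih (i + 1) acc hrest'

-- ... or (with any direction) at the back of the list (indices unchanged)
theorem mobGo_appR (m dm : Int) (t : List (Int × Int)) :
    ∀ (rest : List (Int × Int)) (i : Nat) (acc : Option (Int × Nat)),
    (∀ p ∈ rest, p.1 < m) →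
    sjtMobGo (t ++ [(m, dm)]) i rest acc = sjtMobGo t i rest acc := by
  intro rest
  induction rest with
  | nil => intro i acc _; simp [sjtMobGo]
  | cons x rest ih =>
      intro i acc hrest
      obtain ⟨v, d⟩ := x
      have hv : v < m := hrest (v, d) List.mem_cons_self
      have hrest' : ∀ p ∈ rest, p.1 < m := fun p hp => hrest p (List.mem_cons_of_mem _ hp)
      simp only [sjtMobGo]
      have hcond : (0 ≤ (↑i : Int) + d ∧ (↑i : Int) + d < ↑((t ++ [(m, dm)]).length) ∧ v > ((t ++ [(m, dm)]).getD ((↑i : Int) + d).toNat (0, 0)).1)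
          ↔ (0 ≤ (↑i : Int) + d ∧ (↑i : Int) + d < ↑(t.length) ∧ v > (t.getD ((↑i : Int) + d).toNat (0, 0)).1) := by
    
        by_cases h0 : 0 ≤ (↑i : Int) + d
        · by_cases h1 : (↑i : Int) + d < ↑(t.length)
          · rw [List.getD_append _ _ _ _ (by omega)]
            simp [List.length_append]; omega
          · by_cases h2 : ((↑i : Int) + d) = ↑(t.length)
            · have : ((↑i : Int) + d).toNat = t.length := by omega
              rw [this]
              have : (t ++ [(m, dm)]).getD t.length (0, 0) = (m, dm) := by
                rw [List.getD_append_right _ _ _ _ (by omega)]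
                simp
              rw [this]
              simp only [List.length_append, List.length_cons, List.length_nil]
              constructor <;> rintro ⟨a, b, c⟩
              · omega
              · omega
            · simp [List.length_append]; omega
        · simp [h0]
      simp only [hcond]
      split_ifs with hc
      · cases acc with
        | none => exact ih (i + 1) _ hrest'
        | some a => obtain ⟨mi, mj⟩ := a; by_cases hgt : v > mi <;> simp only [hgt, if_true, if_false] <;> exact ih (i + 1) _ hrest'
      · exact ih (i + 1) acc hrest'

-- what `sjtMobile seq = some (v, j)` guarantees: j is in range, holds value v,
-- and its neighbour in the walking direction exists and is smaller
def MobOk (seq : List (Int × Int)) (acc : Option (Int × Nat)) : Prop :=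
  ∀ v j, acc = some (v, j) →
    j < seq.length ∧ (seq.getD j (0, 0)).1 = v ∧
    0 ≤ (j : Int) + (seq.getD j (0, 0)).2 ∧ (j : Int) + (seq.getD j (0, 0)).2 < seq.length ∧
    v > (seq.getD ((j : Int) + (seq.getD j (0, 0)).2).toNat (0, 0)).1

theorem mobGo_facts (seq : List (Int × Int)) :
    ∀ (rest pre : List (Int × Int)) (acc : Option (Int × Nat)),
    seq = pre ++ rest → MobOk seq acc → MobOk seq (sjtMobGo seq pre.length rest acc) := by
  intro rest
  induction rest with
  | nil => intro pre acc _ hacc; simpa [sjtMobGo] using hacc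
  | cons x rest ih =>
      intro pre acc hseq hacc
      obtain ⟨v, d⟩ := x
      have hget : seq.getD pre.length (0, 0) = (v, d) := by
        rw [hseq, List.getD_append_right _ _ _ _ (le_refl _)]
        simp
      simp only [sjtMobGo]
      have hstep : seq = (pre ++ [(v, d)]) ++ rest := by simp [hseq]
      have hlen : (pre ++ [(v, d)]).length = pre.length + 1 := by simp
      rw [← hlen]
      apply ih (pre ++ [(v, d)]) _ hstep
      intro v' j' h
      split_ifs at h with hc
      · cases acc with
        | none =>
            simp only [Option.some.injEq, Prod.mk.injEq] at h
            obtain ⟨h1, h2⟩ := h; subst h1; subst h2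
            refine ⟨by rw [hseq]; simp, by rw [hget], ?_, ?_, ?_⟩
            · rw [hget]; exact hc.1
            · rw [hget]; exact hc.2.1
            · rw [hget]; exact hc.2.2
        | some a =>
            obtain ⟨mi, mj⟩ := a
            by_cases hgt : v > mi <;> simp only [hgt, if_true, if_false] at h
            · simp only [Option.some.injEq, Prod.mk.injEq] at h
              obtain ⟨h1, h2⟩ := h; subst h1; subst h2
              exact ⟨by rw [hseq]; simp, by rw [hget], by rw [hget]; exact hc.1,
                by rw [hget]; exact hc.2.1, by rw [hget]; exact hc.2.2⟩
            · exact hacc v' j' h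
      · exact hacc v' j' h

theorem mobile_facts (seq : List (Int × Int)) : MobOk seq (sjtMobile seq) := by
  rw [sjtMobile]
  have := mobGo_facts seq seq [] none (by simp) (by intro v j h; cases h)
  simpa using this

-- m in front walking left: the scan result is the scan of the tail, indices shifted by 1
theorem mobile_consL {m : Int} {t : List (Int × Int)} (h : SmallOk m t) :
    sjtMobile ((m, -1) :: t) = (sjtMobile t).map (fun vi => (vi.1, vi.2 + 1)) := by
  show sjtMobGo ((m, -1) :: t) 0 ((m, -1) :: t) none = _
  simp only [sjtMobGo]
  rw [if_neg (by norm_num)]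
  have := mobGo_consL m (-1) t t 0 none h
  simpa using this

-- m strictly inside walking left (u ≠ []): m itself is the mobile integer
theorem mobile_mid {m : Int} {u v : List (Int × Int)} (h : SmallOk m (u ++ v)) (hu : u ≠ []) :
    sjtMobile (u ++ (m, -1) :: v) = some (m, u.length) := by
  have hsmall_u : ∀ p ∈ u, p.1 < m := fun p hp => (h p (List.mem_append_left _ hp)).1
  have hsmall_v : ∀ p ∈ v, p.1 < m := fun p hp => (h p (List.mem_append_right _ hp)).1
  have hgetu : ∀ j, j < u.length → ((u ++ (m, -1) :: v).getD j (0, 0)).1 < m := by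
    intro j hj
    rw [List.getD_append _ _ _ _ hj, List.getD_eq_getElem u (0,0) hj]
    exact hsmall_u _ (u.getElem_mem hj)
  show sjtMobGo _ 0 (u ++ (m, -1) :: v) none = _
  rw [mobGo_append]
  have hlt := mobGo_lt (u ++ (m, -1) :: v) m u 0 none hsmall_u (by rintro _ _ ⟨⟩)
  simp only [sjtMobGo, Nat.zero_add]
  have hc : (0 ≤ (↑u.length : Int) + (-1) ∧ (↑u.length : Int) + (-1) < ↑((u ++ (m, -1) :: v).length) ∧ m > ((u ++ (m, -1) :: v).getD ((↑u.length : Int) + (-1)).toNat (0, 0)).1) := by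
    have hul : 0 < u.length := List.length_pos_iff.mpr hu
    refine ⟨by omega, by simp, ?_⟩
    have : ((↑u.length : Int) + (-1)).toNat = u.length - 1 := by omega
    rw [this]
    exact hgetu _ (by omega)
  rw [if_pos hc]
  cases hacc : sjtMobGo (u ++ (m, -1) :: v) 0 u none with
  | none => exact mobGo_absorb _ m v _ _ hsmall_v
  | some a =>
      obtain ⟨mi, mj⟩ := a
      have : mi < m := hlt mi mj hacc
      simp only [gt_iff_lt, this, if_true]
      exact mobGo_absorb _ m v _ _ hsmall_v

theorem getD_val_lt {m : Int} {t : List (Int × Int)} (h : ∀ p ∈ t, p.1 < m) :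
    ∀ j, j < t.length → (t.getD j (0, 0)).1 < m := by
  intro j hj
  rw [List.getD_eq_getElem t (0,0) hj]
  exact h _ (t.getElem_mem hj)

-- m strictly inside walking right (v ≠ []): m itself is the mobile integer
theorem mobile_midR {m : Int} {u v : List (Int × Int)} (h : SmallOk m (u ++ v)) (hv : v ≠ []) :
    sjtMobile (u ++ (m, 1) :: v) = some (m, u.length) := by
  have hsmall_u : ∀ p ∈ u, p.1 < m := fun p hp => (h p (List.mem_append_left _ hp)).1
  have hsmall_v : ∀ p ∈ v, p.1 < m := fun p hp => (h p (List.mem_append_right _ hp)).1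
  show sjtMobGo _ 0 (u ++ (m, 1) :: v) none = _
  rw [mobGo_append]
  have hlt := mobGo_lt (u ++ (m, 1) :: v) m u 0 none hsmall_u (by rintro _ _ ⟨⟩)
  simp only [sjtMobGo, Nat.zero_add]
  have hvl : 0 < v.length := List.length_pos_iff.mpr hv
  have hc : (0 ≤ (↑u.length : Int) + 1 ∧ (↑u.length : Int) + 1 < ↑((u ++ (m, 1) :: v).length) ∧ m > ((u ++ (m, 1) :: v).getD ((↑u.length : Int) + 1).toNat (0, 0)).1) := by
    refine ⟨by omega, by simp; omega, ?_⟩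
    have h1 : ((↑u.length : Int) + 1).toNat = u.length + 1 := by omega
    rw [h1, List.getD_append_right _ _ _ _ (by omega)]
    have h2 : u.length + 1 - u.length = 1 := by omega
    rw [h2]
    show m > (v.getD 0 (0, 0)).1
    exact getD_val_lt hsmall_v 0 hvl
  rw [if_pos hc]
  cases hacc : sjtMobGo (u ++ (m, 1) :: v) 0 u none with
  | none => exact mobGo_absorb _ m v _ _ hsmall_v
  | some a =>
      obtain ⟨mi, mj⟩ := a
      have : mi < m := hlt mi mj hacc
      simp only [gt_iff_lt, this, if_true]
      exact mobGo_absorb _ m v _ _ hsmall_v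

-- m at the back walking right: not mobile, the scan is exactly the scan of t
theorem mobile_appR1 {m : Int} {t : List (Int × Int)} (h : SmallOk m t) :
    sjtMobile (t ++ [(m, 1)]) = sjtMobile t := by
  have hsmall : ∀ p ∈ t, p.1 < m := fun p hp => (h p hp).1
  show sjtMobGo _ 0 (t ++ [(m, 1)]) none = _
  rw [mobGo_append, mobGo_appR m 1 t t 0 none hsmall]
  simp only [sjtMobGo, Nat.zero_add]
  rw [if_neg (by simp)]
  rfl

theorem getD_append_self (l l' : List (Int × Int)) (x d : Int × Int) : (l ++ x :: l').getD l.length d = x := by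
  rw [List.getD_append_right _ _ _ _ (le_refl _)]; simp

theorem getD_mem_of_lt (t : List (Int × Int)) (j : Nat) (hj : j < t.length) : t.getD j (0, 0) ∈ t := by
  rw [List.getD_eq_getElem t (0,0) hj]; exact t.getElem_mem hj

-- flipping "all values greater than m" does nothing when no value exceeds m
theorem flip_noop {m : Int} {l : List (Int × Int)} (h : ∀ p ∈ l, ¬ p.1 > m) :
    l.map (fun p => if p.1 > m then (p.1, -p.2) else p) = l := by
  conv_rhs => rw [← List.map_id l]
  exact List.map_congr_left (fun p hp => by rw [if_neg (h p hp)]; rfl)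

-- the mobile maximum m steps left: pure swap, no direction flips
theorem swap_m_left {m : Int} {u' v : List (Int × Int)} {e : Int × Int}
    (he : e.1 < m) (hu : ∀ p ∈ u', p.1 < m) (hv : ∀ p ∈ v, p.1 < m) :
    sjtSwapUpd (u' ++ e :: (m, -1) :: v) (u'.length + 1) = u' ++ (m, -1) :: e :: v := by
  have hpre : u' ++ e :: (m, -1) :: v = (u' ++ [e]) ++ (m, -1) :: v := by simp
  have hget1 : (u' ++ e :: (m, -1) :: v).getD (u'.length + 1) (0, 0) = (m, -1) := by
    rw [hpre, show u'.length + 1 = (u' ++ [e]).length by simp, getD_append_self]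
  have hget2 : (u' ++ e :: (m, -1) :: v).getD u'.length (0, 0) = e := by
    rw [getD_append_self]
  simp only [sjtSwapUpd, hget1]
  have hnb : ((↑(u'.length + 1) : Int) + -1).toNat = u'.length := by omega
  rw [hnb, hget2]
  have hs1 : (u' ++ e :: (m, -1) :: v).set (u'.length + 1) e = u' ++ e :: e :: v := by
    rw [hpre, List.set_append_right _ _ (by simp)]
    simp
  rw [hs1]
  have hs2 : (u' ++ e :: e :: v).set u'.length (m, -1) = u' ++ (m, -1) :: e :: v := by
    rw [List.set_append_right _ _ (le_refl _)]
    simp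
  rw [hs2]
  apply flip_noop
  intro p hp
  simp only [List.mem_append, List.mem_cons] at hp
  rcases hp with h1 | h1 | h1 | h1
  · have := hu p h1; omega
  · subst h1; simp
  · subst h1; omega
  · have := hv p h1; omega

-- the mobile maximum m steps right: pure swap, no direction flips
theorem swap_m_right {m : Int} {u v : List (Int × Int)} {e : Int × Int}
    (he : e.1 < m) (hu : ∀ p ∈ u, p.1 < m) (hv : ∀ p ∈ v, p.1 < m) :
    sjtSwapUpd (u ++ (m, 1) :: e :: v) u.length = u ++ e :: (m, 1) :: v := by
  have hget1 : (u ++ (m, 1) :: e :: v).getD u.length (0, 0) = (m, 1) := getD_append_self _ _ _ _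
  have hget2 : (u ++ (m, 1) :: e :: v).getD (u.length + 1) (0, 0) = e := by
    rw [show u ++ (m, 1) :: e :: v = (u ++ [(m, 1)]) ++ e :: v by simp,
        show u.length + 1 = (u ++ [(m, 1)]).length by simp, getD_append_self]
  simp only [sjtSwapUpd, hget1]
  have hnb : ((↑u.length : Int) + 1).toNat = u.length + 1 := by omega
  rw [hnb, hget2]
  have hs1 : (u ++ (m, 1) :: e :: v).set u.length e = u ++ e :: e :: v := by
    rw [List.set_append_right _ _ (le_refl _)]
    simp
  rw [hs1]
  have hs2 : (u ++ e :: e :: v).set (u.length + 1) (m, 1) = u ++ e :: (m, 1) :: v := by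
    rw [List.set_append_right _ _ (by omega)]
    simp
  rw [hs2]
  apply flip_noop
  intro p hp
  simp only [List.mem_append, List.mem_cons] at hp
  rcases hp with h1 | h1 | h1 | h1
  · have := hu p h1; omega
  · subst h1; omega
  · subst h1; simp
  · have := hv p h1; omega

-- a smaller element swaps: m in front just has its direction flipped
theorem swap_small_consL {m dm v0 : Int} {i : Nat} {t : List (Int × Int)}
    (h : SmallOk m t) (hm : sjtMobile t = some (v0, i)) :
    sjtSwapUpd ((m, dm) :: t) (i + 1) = (m, -dm) :: sjtSwapUpd t i := by
  obtain ⟨hi, hval, hnb0, hnb1, _⟩ := mobile_facts t v0 i hm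
  set d := (t.getD i (0, 0)).2 with hd
  have hv0 : v0 < m := by
    have := (h _ (getD_mem_of_lt t i hi)).1
    omega
  have hns : ((↑(i + 1) : Int) + d).toNat = ((↑i : Int) + d).toNat + 1 := by omega
  have hvd : ((m, dm) :: t).getD (i + 1) (0, 0) = t.getD i (0, 0) := by simp
  simp only [sjtSwapUpd, hvd, ← hd, hns]
  have hget2 : ((m, dm) :: t).getD (((↑i : Int) + d).toNat + 1) (0, 0) = t.getD ((↑i : Int) + d).toNat (0, 0) := by simp
  rw [hget2]
  have hset : ∀ (x y : Int × Int), (((m, dm) :: t).set (i + 1) x).set (((↑i : Int) + d).toNat + 1) y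
      = (m, dm) :: ((t.set i x).set (((↑i : Int) + d).toNat) y) := by
    intro x y; simp
  rw [hset]
  simp only [List.map_cons]
  rw [if_pos (by simp only [hval]; omega)]

-- a smaller element swaps: m at the back just has its direction flipped
theorem swap_small_appR {m dm v0 : Int} {i : Nat} {t : List (Int × Int)}
    (h : SmallOk m t) (hm : sjtMobile t = some (v0, i)) :
    sjtSwapUpd (t ++ [(m, dm)]) i = sjtSwapUpd t i ++ [(m, -dm)] := by
  obtain ⟨hi, hval, hnb0, hnb1, _⟩ := mobile_facts t v0 i hm
  set d := (t.getD i (0, 0)).2 with hd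
  have hv0 : v0 < m := by
    have := (h _ (getD_mem_of_lt t i hi)).1
    omega
  have hvd : (t ++ [(m, dm)]).getD i (0, 0) = t.getD i (0, 0) := List.getD_append _ _ _ _ hi
  have hnslt : ((↑i : Int) + d).toNat < t.length := by omega
  simp only [sjtSwapUpd, hvd, ← hd]
  have hget2 : (t ++ [(m, dm)]).getD (((↑i : Int) + d).toNat) (0, 0) = t.getD ((↑i : Int) + d).toNat (0, 0) :=
    List.getD_append _ _ _ _ hnslt
  rw [hget2]
  have hset : ∀ (x y : Int × Int), ((t ++ [(m, dm)]).set i x).set (((↑i : Int) + d).toNat) y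
      = ((t.set i x).set (((↑i : Int) + d).toNat) y) ++ [(m, dm)] := by
    intro x y
    rw [List.set_append_left _ _ (by omega), List.set_append_left _ _ (by simpa using hnslt)]
  rw [hset, List.map_append]
  simp only [List.map_cons, List.map_nil]
  rw [if_pos (by simp only [hval]; omega)]

-- swapping and flipping directions preserves "all entries below m with directions ±1"
theorem smallOk_swap {m v0 : Int} {i : Nat} {t : List (Int × Int)}
    (h : SmallOk m t) (hm : sjtMobile t = some (v0, i)) :
    SmallOk m (sjtSwapUpd t i) := by
  obtain ⟨hi, hval, hnb0, hnb1, _⟩ := mobile_facts t v0 i hm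
  intro p hp
  simp only [sjtSwapUpd, List.mem_map] at hp
  obtain ⟨q, hq, hflip⟩ := hp
  have hqt : q ∈ t := by
    rcases List.mem_or_eq_of_mem_set hq with hq1 | hq1
    · rcases List.mem_or_eq_of_mem_set hq1 with hq2 | hq2
      · exact hq2
      · subst hq2; exact getD_mem_of_lt t _ (by omega)
    · subst hq1; exact getD_mem_of_lt t i hi
  obtain ⟨hq1, hq2⟩ := h q hqt
  subst hflip
  split_ifs with hgt
  · exact ⟨hq1, by rcases hq2 with h2 | h2 <;> rw [h2] <;> simp⟩
  · exact ⟨hq1, hq2⟩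

def RunA (s : List (Int × Int)) (r : List (List Int)) : Prop :=
  ∃ f, sjtLoop f s = some r

theorem runA_none {s : List (Int × Int)} (h : sjtMobile s = none) : RunA s [s.map (·.1)] :=
  ⟨1, by simp [sjtLoop, h]⟩

theorem runA_some {s : List (Int × Int)} {v0 : Int} {i : Nat} {r : List (List Int)}
    (h : sjtMobile s = some (v0, i)) (hr : RunA (sjtSwapUpd s i) r) : RunA s (s.map (·.1) :: r) := by
  obtain ⟨f, hf⟩ := hr
  exact ⟨f + 1, by simp [sjtLoop, h, hf]⟩

theorem runA_inv {s : List (Int × Int)} {r : List (List Int)} (h : RunA s r) :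
    (sjtMobile s = none ∧ r = [s.map (·.1)]) ∨
    (∃ v0 i r', sjtMobile s = some (v0, i) ∧ r = s.map (·.1) :: r' ∧ RunA (sjtSwapUpd s i) r') := by
  obtain ⟨f, hf⟩ := h
  cases f with
  | zero => cases hf
  | succ f =>
      simp only [sjtLoop] at hf
      cases hmob : sjtMobile s with
      | none => rw [hmob] at hf; simp at hf; exact Or.inl ⟨rfl, hf.symm⟩
      | some a =>
          obtain ⟨v0, i⟩ := a
          rw [hmob] at hf
          simp only [Option.map_eq_some_iff] at hf
          obtain ⟨r', hr', hcons⟩ := hf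
          exact Or.inr ⟨v0, i, r', rfl, hcons.symm, ⟨f, hr'⟩⟩

-- the permutation read off a state with m inserted at position u.length
theorem map_fst_mid (m d : Int) (u v : List (Int × Int)) :
    (u ++ (m, d) :: v).map (·.1) = pvIns m ((u ++ v).map (·.1)) u.length := by
  simp only [pvIns, List.map_append, List.map_cons]
  rw [List.take_left' (by simp), List.drop_left' (by simp)]

-- m sweeps from position u.length down to position 0, emitting one
-- permutation (with m inserted at positions u.length, …, 1) per step
theorem sweepL (m : Int) (u : List (Int × Int)) : ∀ (v : List (Int × Int)) (r2 : List (List Int)),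
    SmallOk m (u ++ v) → RunA ((m, -1) :: (u ++ v)) r2 →
    RunA (u ++ (m, -1) :: v)
      (((List.range u.length).reverse.map (fun j => pvIns m ((u ++ v).map (·.1)) (j + 1))) ++ r2) := by
  induction u using List.reverseRecOn with
  | nil => intro v r2 _ h2; simpa using h2
  | append_singleton us e ih =>
      intro v r2 hsm h2
      have hre : us ++ [e] ++ v = us ++ e :: v := by simp
      have hsm' : SmallOk m (us ++ e :: v) := by rw [hre] at hsm; exact hsm
      have hmob : sjtMobile ((us ++ [e]) ++ (m, -1) :: v) = some (m, us.length + 1) := by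
        have := mobile_mid (m := m) (u := us ++ [e]) (v := v) (by rw [hre]; exact hsm') (by simp)
        simpa using this
      have hswap : sjtSwapUpd ((us ++ [e]) ++ (m, -1) :: v) (us.length + 1) = us ++ (m, -1) :: e :: v := by
        have he : e.1 < m := (hsm' e (by simp)).1
        have hu : ∀ p ∈ us, p.1 < m := fun p hp => (hsm' p (by simp [hp])).1
        have hv : ∀ p ∈ v, p.1 < m := fun p hp => (hsm' p (by simp [hp])).1
        simpa using swap_m_left he hu hv
      have ihh := ih (e :: v) r2 (by simpa using hsm') (by simpa using h2)
      have hrun := runA_some hmob (by rw [hswap]; exact ihh)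
      have hemit : ((us ++ [e]) ++ (m, -1) :: v).map (·.1)
          = pvIns m ((us ++ [e] ++ v).map (·.1)) (us.length + 1) := by
        have := map_fst_mid m (-1) (us ++ [e]) v
        simpa using this
      rw [hemit] at hrun
      have hlist : (List.range (us ++ [e]).length).reverse.map (fun j => pvIns m ((us ++ [e] ++ v).map (·.1)) (j + 1))
          = pvIns m ((us ++ [e] ++ v).map (·.1)) (us.length + 1)
            :: (List.range us.length).reverse.map (fun j => pvIns m ((us ++ e :: v).map (·.1)) (j + 1)) := by
        simp [List.range_succ]
      rw [show ((us ++ [e]) ++ (m, -1) :: v) = us ++ [e] ++ (m, -1) :: v by simp] at hrun ⊢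
      rw [hlist]
      simpa using hrun

-- m sweeps right from position u.length to the end, emitting one
-- permutation (with m inserted at positions u.length, …, len-1) per step
theorem sweepR (m : Int) : ∀ (v u : List (Int × Int)) (r2 : List (List Int)),
    SmallOk m (u ++ v) → RunA ((u ++ v) ++ [(m, 1)]) r2 →
    RunA (u ++ (m, 1) :: v)
      (((List.range v.length).map (fun j => pvIns m ((u ++ v).map (·.1)) (u.length + j))) ++ r2) := by
  intro v
  induction v with
  | nil => intro u r2 _ h2; simpa using h2
  | cons e v' ih =>
      intro u r2 hsm h2
      have hmob : sjtMobile (u ++ (m, 1) :: e :: v') = some (m, u.length) :=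
        mobile_midR hsm (by simp)
      have hswap : sjtSwapUpd (u ++ (m, 1) :: e :: v') u.length = u ++ e :: (m, 1) :: v' := by
        have he : e.1 < m := (hsm e (by simp)).1
        have hu : ∀ p ∈ u, p.1 < m := fun p hp => (hsm p (by simp [hp])).1
        have hv : ∀ p ∈ v', p.1 < m := fun p hp => (hsm p (by simp [hp])).1
        exact swap_m_right he hu hv
      have ihh := ih (u ++ [e]) r2 (by simpa using hsm) (by simpa using h2)
      have hrun := runA_some hmob (by rw [hswap]; simpa using ihh)
      have hemit : (u ++ (m, 1) :: e :: v').map (·.1)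
          = pvIns m ((u ++ e :: v').map (·.1)) u.length := map_fst_mid m 1 u (e :: v')
      rw [hemit] at hrun
      have hlist : (List.range (e :: v').length).map (fun j => pvIns m ((u ++ e :: v').map (·.1)) (u.length + j))
          = pvIns m ((u ++ e :: v').map (·.1)) u.length
            :: (List.range v'.length).map (fun j => pvIns m ((u ++ [e] ++ v').map (·.1)) ((u ++ [e]).length + j)) := by
        rw [List.length_cons, List.range_succ_eq_map, List.map_cons, List.map_map]
        refine congrArg₂ _ (by simp) ?_
        apply List.map_congr_left
        intro j _
        simp only [Function.comp_apply, List.length_append, List.length_cons, List.length_nil]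
        have h1 : ((u ++ [e] ++ v').map (·.1)) = ((u ++ e :: v').map (·.1)) := by simp
        rw [h1]
        congr 1
        omega
      rw [hlist]
      simpa using hrun

-- the heart of the equivalence: running A's machine on a small state with the
-- maximum m appended (walking left) produces exactly B's right-to-left
-- insertion sweep over the small run, and dually for m in front walking right
theorem zig_zag (m : Int) : ∀ (N : Nat) (r : List (List Int)) (t : List (Int × Int)),
    r.length ≤ N → SmallOk m t → RunA t r →
    RunA (t ++ [(m, -1)]) (sjtZig m true r) ∧ RunA ((m, 1) :: t) (sjtZig m false r) := by
  intro N
  induction N with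
  | zero =>
      intro r t hN _ hrun
      rcases runA_inv hrun with ⟨_, hr⟩ | ⟨_, _, _, _, hr, _⟩ <;> (subst hr; simp at hN)
  | succ N ih =>
      intro r t hN hsm hrun
      have hplen : (t.map (·.1)).length = t.length := by simp
      rcases runA_inv hrun with ⟨hmob, hr⟩ | ⟨v0, i, r', hmob, hr, hrun'⟩
      · -- the small machine is stuck: exactly one permutation, one full sweep
        subst hr
        constructor
        · -- m at the back walking left
          have hin : RunA ((m, -1) :: (t ++ [])) [pvIns m (t.map (·.1)) 0] := by
            have h0 : sjtMobile ((m, -1) :: t) = none := by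
              rw [mobile_consL hsm, hmob]; rfl
            have := runA_none h0
            simpa [pvIns] using this
          have := sweepL m t [] _ (by simpa using hsm) hin
          simp only [List.append_nil] at this
          rw [sjtZig, sjtZig]
          simp only [if_true, List.append_nil]
          have hlist : (List.range ((t.map (·.1)).length + 1)).reverse.map (pvIns m (t.map (·.1)))
              = (List.range t.length).reverse.map (fun j => pvIns m (t.map (·.1)) (j + 1))
                ++ [pvIns m (t.map (·.1)) 0] := by
            rw [hplen, List.range_succ_eq_map, List.reverse_cons, List.map_append,
                ← List.map_reverse, List.map_map]
            rfl
          rw [hlist]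
          simpa using this
        · -- m in front walking right
          have hin : RunA ((t ++ []) ++ [(m, 1)]) [pvIns m (t.map (·.1)) t.length] := by
            have h0 : sjtMobile (t ++ [(m, 1)]) = none := by rw [mobile_appR1 hsm, hmob]
            have h2 := runA_none h0
            rw [map_fst_mid m 1 t []] at h2
            simpa using h2
          have := sweepR m t [] _ (by simpa using hsm) (by simpa using hin)
          rw [sjtZig, sjtZig]
          simp only [Bool.false_eq_true, if_false, List.append_nil]
          have hlist : (List.range ((t.map (·.1)).length + 1)).map (pvIns m (t.map (·.1)))
              = (List.range t.length).map (fun j => pvIns m (t.map (·.1)) (0 + j))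
                ++ [pvIns m (t.map (·.1)) t.length] := by
            rw [hplen, List.range_succ, List.map_append]
            simp
          rw [hlist]
          simpa using this
      · -- the small machine steps: one sweep, then recurse with flipped direction
        subst hr
        have hsm' : SmallOk m (sjtSwapUpd t i) := smallOk_swap hsm hmob
        have ihh := ih r' (sjtSwapUpd t i) (by simpa using hN) hsm' hrun'
        constructor
        · -- sweep left, then m sits in front walking right
          have hin : RunA ((m, -1) :: (t ++ [])) (pvIns m (t.map (·.1)) 0 :: sjtZig m false r') := by
            have h1 : sjtMobile ((m, -1) :: t) = some (v0, i + 1) := by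
              rw [mobile_consL hsm, hmob]; rfl
            have h2 := runA_some h1 (by rw [swap_small_consL hsm hmob]; simpa using ihh.2)
            simpa [pvIns] using h2
          have := sweepL m t [] _ (by simpa using hsm) hin
          simp only [List.append_nil] at this
          rw [sjtZig]
          simp only [if_true]
          have hlist : (List.range ((t.map (·.1)).length + 1)).reverse.map (pvIns m (t.map (·.1)))
              = (List.range t.length).reverse.map (fun j => pvIns m (t.map (·.1)) (j + 1))
                ++ [pvIns m (t.map (·.1)) 0] := by
            rw [hplen, List.range_succ_eq_map, List.reverse_cons, List.map_append,
                ← List.map_reverse, List.map_map]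
            rfl
          rw [hlist]
          simpa using this
        · -- sweep right, then m sits at the back walking left
          have hin : RunA ((t ++ []) ++ [(m, 1)]) (pvIns m (t.map (·.1)) t.length :: sjtZig m true r') := by
            have h1 : sjtMobile (t ++ [(m, 1)]) = some (v0, i) := by rw [mobile_appR1 hsm, hmob]
            have h2 := runA_some h1 (by rw [swap_small_appR hsm hmob]; simpa using ihh.1)
            rw [map_fst_mid m 1 t []] at h2
            simpa using h2
          have := sweepR m t [] _ (by simpa using hsm) (by simpa using hin)
          rw [sjtZig]
          simp only [Bool.false_eq_true, if_false]
          have hlist : (List.range ((t.map (·.1)).length + 1)).map (pvIns m (t.map (·.1)))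
              = (List.range t.length).map (fun j => pvIns m (t.map (·.1)) (0 + j))
                ++ [pvIns m (t.map (·.1)) t.length] := by
            rw [hplen, List.range_succ, List.map_append]
            simp
          rw [hlist]
          simpa using this

def initSt (k : Nat) : List (Int × Int) := (List.range k).map (fun i : Nat => ((i : Int) + 1, -1))

theorem main_run : ∀ k : Nat, RunA (initSt k) (sjtPerms k) := by
  intro k
  induction k with
  | zero => exact ⟨1, rfl⟩
  | succ k ih =>
      have hinit : initSt (k + 1) = initSt k ++ [((k : Int) + 1, -1)] := by
        simp [initSt, List.range_succ]
      have hsm : SmallOk ((k : Int) + 1) (initSt k) := by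
        intro p hp
        simp only [initSt, List.mem_map] at hp
        obtain ⟨i, hi, hpi⟩ := hp
        rw [List.mem_range] at hi
        subst hpi
        refine ⟨by simp; omega, by simp⟩
      rw [hinit]
      exact (zig_zag ((k : Int) + 1) (sjtPerms k).length (sjtPerms k) (initSt k) (le_refl _) hsm ih).1

theorem pvIns_length {p : List Int} {j : Nat} (k : Int) :
    (pvIns k p j).length = p.length + 1 := by
  simp [pvIns]

theorem zig_mem_len {k : Int} {L : Nat} : ∀ (r : List (List Int)) (b : Bool),
    (∀ p ∈ r, p.length = L) → ∀ p ∈ sjtZig k b r, p.length = L + 1 := by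
  intro r
  induction r with
  | nil => intro b _ p hp; cases hp
  | cons q rest ih =>
      intro b hr p hp
      rw [sjtZig] at hp
      rcases List.mem_append.mp hp with h1 | h1
      · obtain ⟨j, hj, hpj⟩ := List.mem_map.mp h1
        subst hpj
        rw [pvIns_length k, hr q List.mem_cons_self]
      · exact ih (!b) (fun p hp => hr p (List.mem_cons_of_mem _ hp)) p h1

theorem perms_mem_len : ∀ k : Nat, ∀ p ∈ sjtPerms k, p.length = k := by
  intro k
  induction k with
  | zero => intro p hp; simp [sjtPerms] at hp; simp [hp]
  | succ k ih => exact zig_mem_len (sjtPerms k) true ih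

theorem zig_length {k : Int} {L : Nat} : ∀ (r : List (List Int)) (b : Bool),
    (∀ p ∈ r, p.length = L) → (sjtZig k b r).length = (L + 1) * r.length := by
  intro r
  induction r with
  | nil => intro b _; simp [sjtZig]
  | cons q rest ih =>
      intro b hr
      rw [sjtZig]
      have hq : q.length = L := hr q List.mem_cons_self
      have := ih (!b) (fun p hp => hr p (List.mem_cons_of_mem _ hp))
      rcases b <;> simp only [Bool.not_true, Bool.not_false] at this <;> simp [this, hq] <;> ring

theorem perms_length : ∀ k : Nat, (sjtPerms k).length = k.factorial := by
  intro k
  induction k with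
  | zero => rfl
  | succ k ih =>
      show (sjtZig ((k : Int) + 1) true (sjtPerms k)).length = (k + 1).factorial
      rw [zig_length (sjtPerms k) true (perms_mem_len k), ih, Nat.factorial_succ]

theorem loop_exact : ∀ (f : Nat) (s : List (Int × Int)) (r : List (List Int)),
    sjtLoop f s = some r → sjtLoop r.length s = some r := by
  intro f
  induction f with
  | zero => intro s r h; cases h
  | succ f ih =>
      intro s r h
      simp only [sjtLoop] at h
      cases hmob : sjtMobile s with
      | none =>
          rw [hmob] at h
          simp only [Option.some.injEq] at h
          subst h
          simp [sjtLoop, hmob]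
      | some a =>
          obtain ⟨v0, i⟩ := a
          rw [hmob] at h
          simp only [Option.map_eq_some_iff] at h
          obtain ⟨r', hr', hcons⟩ := h
          subst hcons
          have := ih _ _ hr'
          simp [sjtLoop, hmob, this]

theorem ports_agree (n : Int) :
    (sjtLoop (Nat.factorial n.toNat) ((PySem.List.pyRange 0 n 1).map (fun i => (i + 1, (-1 : Int))))).getD []
      = sjtPerms n.toNat := by
  have hseq : (PySem.List.pyRange 0 n 1).map (fun i => (i + 1, (-1 : Int))) = initSt n.toNat := by
    rw [PySem.List.pyRange_one]
    simp only [Int.sub_zero, List.map_map, initSt]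
    apply List.map_congr_left
    intro i _
    simp
  rw [hseq]
  obtain ⟨f, hf⟩ := main_run n.toNat
  have h2 := loop_exact f _ _ hf
  rw [perms_length n.toNat] at h2
  rw [h2]
  rfl

-- ===== VERDICT (by name: the statement is the Claim_ definition above) =====
theorem steinhaus_johnson_trotter_spec : Claim_equal_steinhaus_johnson_trotter := by
  intro n _
  show steinhaus_johnson_trotter n = steinhaus_johnson_trotter_alt n
  unfold steinhaus_johnson_trotter steinhaus_johnson_trotter_alt
  exact ports_agree n
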